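-- pv_equiv track=rewrite | github.com/rmhommes/htnlinpol | yoyo.py | policySetIntersection
-- ===== SOURCE A (Python) =====
-- def isStateSubSet(S1, S2):
-- 	for s1 in S1:
-- 		s1.sort()
-- 	for s2 in S2:
-- 		s2.sort()
-- 	S1 = set(map(lambda e: str(e), S1))
-- 	S2 = set(map(lambda e: str(e), S2))
-- 	return S1.issubset(S2)
--
-- def policySetIntersection(Pi1, Pi2):
-- 	Pir = []
-- 	for S1, t1 in Pi1:
-- 		bPi = False
-- 		for s2, t2 in Pi2:
-- 			if isStateSubSet([list(s2)], S1) and t1 == t2: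
-- 				bPi = True
-- 				break
-- 		if bPi:
-- 			Pir.append((S1, t1))
-- 	return Pir
-- ===== SOURCE B (Python) =====
-- def policySetIntersection(Pi1, Pi2):
-- 	keys = set()
-- 	for s2, t2 in Pi2:
-- 		keys.add((tuple(sorted(s2)), t2))
-- 	Pir = []
-- 	for S1, t1 in Pi1:
-- 		S1s = [sorted(s) for s in S1]
-- 		if any((tuple(s), t1) in keys for s in S1s):
-- 			Pir.append((S1s, t1))
-- 	return Pir
-- ===== Notes on version B (the rewrite author's own statement) =====
-- stated objective: faster
-- what changed: Instead of rescanning Pi2 and re-sorting/stringifying S1 for every pair, B builds one hash set of (sorted-state-tuple, tag) keys from Pi2 and answers each Pi1 entry by sorting its states once and probing the set.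
import Mathlib
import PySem

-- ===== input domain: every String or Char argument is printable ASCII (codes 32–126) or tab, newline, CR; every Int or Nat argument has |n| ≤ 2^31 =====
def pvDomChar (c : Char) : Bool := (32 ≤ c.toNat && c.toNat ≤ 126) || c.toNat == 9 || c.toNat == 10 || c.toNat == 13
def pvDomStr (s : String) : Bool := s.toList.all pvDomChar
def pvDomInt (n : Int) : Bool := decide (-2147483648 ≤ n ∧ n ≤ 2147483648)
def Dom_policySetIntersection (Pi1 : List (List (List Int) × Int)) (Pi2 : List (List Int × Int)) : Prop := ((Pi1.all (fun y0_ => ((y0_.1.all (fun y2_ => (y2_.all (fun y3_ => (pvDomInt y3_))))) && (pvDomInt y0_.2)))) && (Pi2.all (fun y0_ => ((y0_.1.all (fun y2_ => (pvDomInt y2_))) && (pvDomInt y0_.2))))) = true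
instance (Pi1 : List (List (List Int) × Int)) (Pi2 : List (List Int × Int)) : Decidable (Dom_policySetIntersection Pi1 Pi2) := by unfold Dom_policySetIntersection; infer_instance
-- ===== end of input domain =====

-- B replaces A's rescan of Pi2 (re-sorting and re-stringifying S1 per pair) by one set of
-- (sorted-state, tag) keys built from Pi2, probed once per state of each S1 entry (objective: faster).
-- NOTE: Python A sorts Pi1's inner state lists IN PLACE (observable mutation); the equivalence
-- proved here is about the RETURN value only (B does not mutate its arguments).

-- ===== PORT A =====
-- str(e) for a Python list of ints, on the List Char side: "[a, b, c]".
-- Hand-ported (CPython's list repr for int elements): '[' ++ ", ".join(str(n)) ++ ']'; exact for int lists.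
def pyStrIntListBody : List Int → List Char
  | [] => []
  | [a] => PySem.Int.toChars a
  | a :: b :: as => PySem.Int.toChars a ++ ',' :: ' ' :: pyStrIntListBody (b :: as)

def pyStrIntList (l : List Int) : List Char := '[' :: pyStrIntListBody l ++ [']']

-- s.sort() on a list of ints
def pySortInt (l : List Int) : List Int := PySem.List.sorted l (fun x => x) false

-- isStateSubSet(S1, S2): sorts both arguments' inner lists in place, then compares str-sets.
-- Returns (issubset result, mutated S1, mutated S2) so callers can thread the in-place mutation.
def isStateSubSet (S1 S2 : List (List Int)) : Bool × List (List Int) × List (List Int) :=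
  let S1s := S1.map pySortInt
  let S2s := S2.map pySortInt
  let set1 : PySem.Set (List Char) := PySem.Set.ofList (S1s.map pyStrIntList)
  let set2 : PySem.Set (List Char) := PySem.Set.ofList (S2s.map pyStrIntList)
  (PySem.Set.issubset set1 set2, S1s, S2s)

-- the inner 'for s2, t2 in Pi2: … break' loop; threads the current (mutated) S1
def policyInnerLoop (Pi2 : List (List Int × Int)) (S1 : List (List Int)) (t1 : Int) :
    Bool × List (List Int) :=
  match Pi2 with
  | [] => (false, S1)
  | (s2, t2) :: rest =>
    let r := isStateSubSet [s2] S1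
    if r.1 && decide (t1 = t2) then (true, r.2.2)
    else policyInnerLoop rest r.2.2 t1

def policySetIntersection (Pi1 : List (List (List Int) × Int)) (Pi2 : List (List Int × Int)) : List (List (List Int) × Int) :=
  Pi1.foldl (fun Pir p =>
    let r := policyInnerLoop Pi2 p.1 p.2
    if r.1 then Pir ++ [(r.2, p.2)] else Pir) []

-- ===== PORT B =====
def policySetIntersection_alt (Pi1 : List (List (List Int) × Int)) (Pi2 : List (List Int × Int)) : List (List (List Int) × Int) :=
  let keys : PySem.Set (List Int × Int) :=
    Pi2.foldl (fun s p => PySem.Set.add s (PySem.List.sorted p.1 (fun x => x) false, p.2)) PySem.Set.empty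
  Pi1.foldl (fun Pir p =>
    let S1s := p.1.map (fun s => PySem.List.sorted s (fun x => x) false)
    if S1s.any (fun s => PySem.Set.contains keys (s, p.2)) then Pir ++ [(S1s, p.2)] else Pir) []

-- ===== PRECONDITION & SPEC =====
def Spec_policySetIntersection (Pi1 : List (List (List Int) × Int)) (Pi2 : List (List Int × Int)) (out : List (List (List Int) × Int)) : Prop := out = policySetIntersection_alt Pi1 Pi2
instance (Pi1 : List (List (List Int) × Int)) (Pi2 : List (List Int × Int)) (out : List (List (List Int) × Int)) : Decidable (Spec_policySetIntersection Pi1 Pi2 out) := by unfold Spec_policySetIntersection; infer_instance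

-- ===== CLAIM (what is proved, stated in full; the proofs are below) =====
def Claim_equal_policySetIntersection : Prop := ∀ (Pi1 : List (List (List Int) × Int)) (Pi2 : List (List Int × Int)), Dom_policySetIntersection Pi1 Pi2 → Spec_policySetIntersection Pi1 Pi2 (policySetIntersection Pi1 Pi2)

-- ===== LEMMAS AND PROOFS =====

-- §1 decimal digits: Nat.toDigits 10 is injective, nonempty, and never produces ',' or '-'
theorem toDigitsCore_acc (b : Nat) : ∀ (f n : Nat) (acc : List Char),
    Nat.toDigitsCore b f n acc = Nat.toDigitsCore b f n [] ++ acc := by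
  intro f
  induction f with
  | zero => intro n acc; simp [Nat.toDigitsCore]
  | succ f ih =>
    intro n acc
    simp only [Nat.toDigitsCore]
    by_cases h : n / b = 0
    · simp [h]
    · simp only [h, if_false]
      rw [ih (n / b) (Nat.digitChar (n % b) :: acc), ih (n / b) [Nat.digitChar (n % b)]]
      simp

theorem toDigits_lt (n : Nat) (h : n < 10) : Nat.toDigits 10 n = [Nat.digitChar n] := by
  simp [Nat.toDigits, Nat.toDigitsCore, Nat.div_eq_of_lt h, Nat.mod_eq_of_lt h]

theorem toDigitsCore_fuel : ∀ (f g n : Nat), n < f → n < g →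
    Nat.toDigitsCore 10 f n [] = Nat.toDigitsCore 10 g n [] := by
  intro f
  induction f with
  | zero => intro g n h; omega
  | succ f ih =>
    intro g n hf hg
    match g, hg with
    | g + 1, hg =>
      simp only [Nat.toDigitsCore]
      by_cases h : n / 10 = 0
      · simp [h]
      · simp only [h, if_false]
        have hn : 0 < n := by
          rcases Nat.eq_zero_or_pos n with h0 | h0
          · exact absurd (by simp [h0]) h
          · exact h0
        have hd : n / 10 < n := Nat.div_lt_self hn (by omega)
        rw [toDigitsCore_acc 10 f, toDigitsCore_acc 10 g, ih g (n / 10) (by omega) (by omega)]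

theorem toDigits_ge (n : Nat) (h : 10 ≤ n) :
    Nat.toDigits 10 n = Nat.toDigits 10 (n / 10) ++ [Nat.digitChar (n % 10)] := by
  have h10 : n / 10 ≠ 0 := by
    intro h0; have := Nat.div_eq_of_lt (show n < 10 by omega); omega
  show Nat.toDigitsCore 10 (n + 1) n [] = _
  simp only [Nat.toDigitsCore, h10, if_false]
  rw [toDigitsCore_acc 10 n (n / 10)]
  congr 1
  exact toDigitsCore_fuel n (n / 10 + 1) (n / 10)
    (Nat.lt_of_lt_of_le (Nat.div_lt_self (by omega) (by omega)) (Nat.le_of_lt_succ (Nat.lt_succ_self n))) (Nat.lt_succ_self _)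

theorem toDigits_ne_nil (n : Nat) : Nat.toDigits 10 n ≠ [] := by
  by_cases h : n < 10
  · simp [toDigits_lt n h]
  · simp [toDigits_ge n (by omega)]

theorem digitChar_tame : ∀ m, m < 10 → Nat.digitChar m ≠ ',' ∧ Nat.digitChar m ≠ '-' := by decide

theorem toDigits_tame (n : Nat) : ∀ c ∈ Nat.toDigits 10 n, c ≠ ',' ∧ c ≠ '-' := by
  induction n using Nat.strong_induction_on with
  | _ n ih =>
    by_cases h : n < 10
    · rw [toDigits_lt n h]
      intro c hc
      simp at hc
      subst hc
      exact digitChar_tame n h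
    · rw [toDigits_ge n (by omega)]
      intro c hc
      rcases List.mem_append.mp hc with hc | hc
      · exact ih (n / 10) (Nat.div_lt_self (by omega) (by omega)) c hc
      · simp at hc
        subst hc
        exact digitChar_tame (n % 10) (Nat.mod_lt n (by omega))

theorem digitChar_inj : ∀ a, a < 10 → ∀ b, b < 10 → Nat.digitChar a = Nat.digitChar b → a = b := by
  decide

theorem toDigits_inj : ∀ (a b : Nat), Nat.toDigits 10 a = Nat.toDigits 10 b → a = b := by
  intro a
  induction a using Nat.strong_induction_on with
  | _ a ih =>
    intro b h
    by_cases ha : a < 10 <;> by_cases hb : b < 10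
    · rw [toDigits_lt a ha, toDigits_lt b hb] at h
      exact digitChar_inj a ha b hb (by simpa using h)
    · rw [toDigits_lt a ha, toDigits_ge b (by omega)] at h
      rcases List.append_singleton_inj.mp (show ([] : List Char) ++ [Nat.digitChar a] = _ from h) with ⟨h1, _⟩
      exact absurd h1.symm (toDigits_ne_nil _)
    · rw [toDigits_ge a (by omega), toDigits_lt b hb] at h
      rcases List.append_singleton_inj.mp (show _ = ([] : List Char) ++ [Nat.digitChar b] from h) with ⟨h1, _⟩
      exact absurd h1 (toDigits_ne_nil _)
    · rw [toDigits_ge a (by omega), toDigits_ge b (by omega)] at h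
      rcases List.append_singleton_inj.mp h with ⟨h1, h2⟩
      have hdiv : a / 10 = b / 10 :=
        ih (a / 10) (Nat.div_lt_self (by omega) (by omega)) (b / 10) h1
      have hmod : a % 10 = b % 10 :=
        digitChar_inj _ (Nat.mod_lt a (by omega)) _ (Nat.mod_lt b (by omega)) h2
      omega

-- §2 str(n) : PySem.Int.toChars is injective, nonempty, comma-free
theorem toChars_tame (n : Int) : ∀ c ∈ PySem.Int.toChars n, c ≠ ',' := by
  unfold PySem.Int.toChars
  split
  · intro c hc
    rcases List.mem_cons.mp hc with hc | hc
    · subst hc; decide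
    · exact (toDigits_tame _ c hc).1
  · intro c hc; exact (toDigits_tame _ c hc).1

theorem toChars_ne_nil (n : Int) : PySem.Int.toChars n ≠ [] := by
  unfold PySem.Int.toChars
  split
  · simp
  · exact toDigits_ne_nil _

theorem toChars_inj (a b : Int) (h : PySem.Int.toChars a = PySem.Int.toChars b) : a = b := by
  unfold PySem.Int.toChars at h
  split at h <;> split at h
  · rename_i ha hb
    rcases List.cons.injEq _ _ _ _ ▸ h with h'
    have : a.natAbs = b.natAbs := toDigits_inj _ _ (by simpa using h)
    omega
  · rename_i ha hb
    have : '-' ∈ Nat.toDigits 10 b.toNat := by rw [← h]; simp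
    exact absurd rfl (toDigits_tame _ '-' this).2
  · rename_i ha hb
    have : '-' ∈ Nat.toDigits 10 a.toNat := by rw [h]; simp
    exact absurd rfl (toDigits_tame _ '-' this).2
  · rename_i ha hb
    have : a.toNat = b.toNat := toDigits_inj _ _ h
    omega

-- §3 the list repr is injective
theorem split_no_comma : ∀ (xs ys p q : List Char),
    (∀ c ∈ xs, c ≠ ',') → (∀ c ∈ ys, c ≠ ',') →
    (p = [] ∨ ∃ t, p = ',' :: t) → (q = [] ∨ ∃ t, q = ',' :: t) →
    xs ++ p = ys ++ q → xs = ys ∧ p = q := by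
  intro xs
  induction xs with
  | nil =>
    intro ys p q hx hy hp hq h
    simp only [List.nil_append] at h
    match ys with
    | [] => exact ⟨rfl, by simpa using h⟩
    | y :: ys' =>
      exfalso
      rcases hp with hp | ⟨t, hp⟩
      · subst hp; simp at h
      · subst hp
        rw [List.cons_append] at h
        injection h with h1 _
        exact hy y (List.mem_cons_self) h1.symm
  | cons x xs' ih =>
    intro ys p q hx hy hp hq h
    match ys with
    | [] =>
      exfalso
      simp only [List.nil_append, List.cons_append] at h
      rcases hq with hq | ⟨t, hq⟩
      · subst hq; simp at h
      · subst hq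
        injection h with h1 _
        exact hx x (List.mem_cons_self) h1
    | y :: ys' =>
      simp only [List.cons_append, List.cons.injEq] at h
      obtain ⟨hxy, h'⟩ := h
      obtain ⟨h1, h2⟩ := ih ys' p q (fun c hc => hx c (by simp [hc])) (fun c hc => hy c (by simp [hc])) hp hq h'
      exact ⟨by rw [hxy, h1], h2⟩

theorem body_ne_nil (a : Int) (l : List Int) : pyStrIntListBody (a :: l) ≠ [] := by
  match l with
  | [] => exact toChars_ne_nil a
  | b :: bs =>
    simp only [pyStrIntListBody]
    intro h
    exact toChars_ne_nil a (List.append_eq_nil_iff.mp h).1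

theorem body_inj : ∀ (l1 l2 : List Int), pyStrIntListBody l1 = pyStrIntListBody l2 → l1 = l2 := by
  intro l1
  induction l1 with
  | nil =>
    intro l2 h
    match l2 with
    | [] => rfl
    | b :: bs => exact absurd h.symm (body_ne_nil b bs)
  | cons a as ih =>
    intro l2 h
    match l2 with
    | [] => exact absurd h (body_ne_nil a as)
    | b :: bs =>
      have hsplit : PySem.Int.toChars a = PySem.Int.toChars b ∧
          (match as with | [] => ([] : List Char) | _ :: _ => ',' :: ' ' :: pyStrIntListBody as) =
          (match bs with | [] => ([] : List Char) | _ :: _ => ',' :: ' ' :: pyStrIntListBody bs) := by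
        apply split_no_comma _ _ _ _ (toChars_tame a) (toChars_tame b)
        · match as with
          | [] => exact Or.inl rfl
          | _ :: _ => exact Or.inr ⟨_, rfl⟩
        · match bs with
          | [] => exact Or.inl rfl
          | _ :: _ => exact Or.inr ⟨_, rfl⟩
        · match as, bs with
          | [], [] => simpa [pyStrIntListBody] using h
          | [], _ :: _ => simpa [pyStrIntListBody] using h
          | _ :: _, [] => simpa [pyStrIntListBody] using h
          | _ :: _, _ :: _ => simpa [pyStrIntListBody] using h
      have hab : a = b := toChars_inj _ _ hsplit.1
      have htail : as = bs := by
        match as, bs with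
        | [], [] => rfl
        | [], _ :: _ => simpa using hsplit.2
        | _ :: _, [] => simpa using hsplit.2
        | a' :: as', b' :: bs' =>
          have : pyStrIntListBody (a' :: as') = pyStrIntListBody (b' :: bs') := by
            have := hsplit.2; simpa using this
          exact ih _ this
      rw [hab, htail]

theorem pyStrIntList_inj (l1 l2 : List Int) (h : pyStrIntList l1 = pyStrIntList l2) : l1 = l2 := by
  unfold pyStrIntList at h
  injection h with _ h2
  exact body_inj _ _ (List.append_singleton_inj.mp h2).1

-- §4 A's subset test is membership of the sorted state
theorem isStateSubSet_fst_iff (s2 : List Int) (S : List (List Int)) :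
    (isStateSubSet [s2] S).1 = true ↔ pySortInt s2 ∈ S.map pySortInt := by
  rw [show (isStateSubSet [s2] S).1 =
      PySem.Set.issubset (PySem.Set.ofList (([s2].map pySortInt).map pyStrIntList))
        (PySem.Set.ofList ((S.map pySortInt).map pyStrIntList)) from rfl]
  rw [PySem.Set.issubset_iff]
  constructor
  · intro h
    have hmem : pyStrIntList (pySortInt s2) ∈ PySem.Set.ofList (([s2].map pySortInt).map pyStrIntList) := by
      simp [PySem.Set.mem_ofList]
    have := h _ hmem
    rw [PySem.Set.mem_ofList, List.mem_map] at this
    obtain ⟨x, hx, hxe⟩ := this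
    exact (pyStrIntList_inj _ _ hxe.symm) ▸ hx
  · intro h x hx
    rw [PySem.Set.mem_ofList] at hx
    simp only [List.map_cons, List.map_nil, List.mem_singleton] at hx
    subst hx
    rw [PySem.Set.mem_ofList]
    exact List.mem_map.mpr ⟨pySortInt s2, h, rfl⟩

theorem isStateSubSet_fst (s2 : List Int) (S : List (List Int)) :
    (isStateSubSet [s2] S).1 = decide (pySortInt s2 ∈ S.map pySortInt) := by
  by_cases hm : pySortInt s2 ∈ S.map pySortInt
  · rw [decide_eq_true hm]
    exact (isStateSubSet_fst_iff s2 S).mpr hm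
  · have hne : (isStateSubSet [s2] S).1 ≠ true := fun h => hm ((isStateSubSet_fst_iff s2 S).mp h)
    rw [decide_eq_false hm]
    exact Bool.eq_false_iff.mpr hne

theorem pySortInt_idem (l : List Int) : pySortInt (pySortInt l) = pySortInt l :=
  PySem.List.sorted_sorted l (fun x => x)

theorem map_pySortInt_idem (S : List (List Int)) :
    (S.map pySortInt).map pySortInt = S.map pySortInt := by
  rw [List.map_map]; exact List.map_congr_left (fun x _ => pySortInt_idem x)

-- §5 the inner loop: its flag is an 'any' over Pi2, its state ends sorted when the flag is true
theorem policyInnerLoop_spec (Pi2 : List (List Int × Int)) : ∀ (S : List (List Int)) (t1 : Int),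
    (policyInnerLoop Pi2 S t1).1 =
      Pi2.any (fun q => decide (pySortInt q.1 ∈ S.map pySortInt) && decide (t1 = q.2)) ∧
    ((policyInnerLoop Pi2 S t1).1 = true → (policyInnerLoop Pi2 S t1).2 = S.map pySortInt) := by
  induction Pi2 with
  | nil => intro S t1; simp [policyInnerLoop]
  | cons q rest ih =>
    intro S t1
    obtain ⟨s2, t2⟩ := q
    have hmut : (isStateSubSet [s2] S).2.2 = S.map pySortInt := rfl
    have hstep : policyInnerLoop ((s2, t2) :: rest) S t1 =
        if decide (pySortInt s2 ∈ S.map pySortInt) && decide (t1 = t2)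
        then (true, S.map pySortInt)
        else policyInnerLoop rest (S.map pySortInt) t1 := by
      show (if (isStateSubSet [s2] S).1 && decide (t1 = t2)
            then (true, (isStateSubSet [s2] S).2.2)
            else policyInnerLoop rest (isStateSubSet [s2] S).2.2 t1) = _
      rw [isStateSubSet_fst, hmut]
    obtain ⟨ih1, ih2⟩ := ih (S.map pySortInt) t1
    rw [map_pySortInt_idem] at ih1 ih2
    by_cases hm : (decide (pySortInt s2 ∈ S.map pySortInt) && decide (t1 = t2)) = true
    · rw [hstep, if_pos hm]
      constructor
      · rw [show ((true, S.map pySortInt) : Bool × List (List Int)).1 = true from rfl, List.any_cons, hm, Bool.true_or]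
      · intro _; rfl
    · rw [hstep, if_neg hm]
      constructor
      · rw [List.any_cons, Bool.eq_false_iff.mpr hm, Bool.false_or]
        exact ih1
      · exact ih2

-- §6 B's set lookup is the same 'any'
theorem keys_mem (Pi2 : List (List Int × Int)) (x : List Int × Int) :
    x ∈ Pi2.foldl (fun s p => PySem.Set.add s (PySem.List.sorted p.1 (fun y => y) false, p.2)) PySem.Set.empty ↔
      ∃ q ∈ Pi2, x = (pySortInt q.1, q.2) := by
  rw [PySem.Set.mem_foldl_add]
  simp [PySem.Set.empty, pySortInt]

theorem alt_cond (Pi2 : List (List Int × Int)) (S : List (List Int)) (t1 : Int) :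
    ((S.map (fun s => PySem.List.sorted s (fun x => x) false)).any (fun s =>
        PySem.Set.contains (Pi2.foldl (fun s p => PySem.Set.add s (PySem.List.sorted p.1 (fun y => y) false, p.2)) PySem.Set.empty) (s, t1))) =
      Pi2.any (fun q => decide (pySortInt q.1 ∈ S.map pySortInt) && decide (t1 = q.2)) := by
  rcases Bool.eq_false_or_eq_true (Pi2.any (fun q => decide (pySortInt q.1 ∈ S.map pySortInt) && decide (t1 = q.2))) with h | h
  · rw [h, List.any_eq_true]
    rw [List.any_eq_true] at h
    obtain ⟨q, hq, hqc⟩ := h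
    simp only [Bool.and_eq_true, decide_eq_true_eq] at hqc
    refine ⟨pySortInt q.1, by simpa [pySortInt] using hqc.1, ?_⟩
    rw [PySem.Set.contains_iff, keys_mem]
    exact ⟨q, hq, by rw [hqc.2]⟩

  · rw [h, List.any_eq_false]
    rw [List.any_eq_false] at h
    intro s hs hcon
    rw [PySem.Set.contains_iff, keys_mem] at hcon
    obtain ⟨q, hq, hqe⟩ := hcon
    have hn := h q hq
    rw [Prod.mk.injEq] at hqe
    apply hn
    rw [Bool.and_eq_true, decide_eq_true_eq, decide_eq_true_eq]
    refine ⟨?_, hqe.2⟩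
    rw [← hqe.1]
    simpa [pySortInt] using hs

-- §7 the two folds agree step by step
theorem fold_eq (Pi2 : List (List Int × Int)) : ∀ (Pi1 : List (List (List Int) × Int)) (acc : List (List (List Int) × Int)),
    Pi1.foldl (fun Pir p =>
      let r := policyInnerLoop Pi2 p.1 p.2
      if r.1 then Pir ++ [(r.2, p.2)] else Pir) acc =
    Pi1.foldl (fun Pir p =>
      let S1s := p.1.map (fun s => PySem.List.sorted s (fun x => x) false)
      if S1s.any (fun s => PySem.Set.contains (Pi2.foldl (fun s p => PySem.Set.add s (PySem.List.sorted p.1 (fun y => y) false, p.2)) PySem.Set.empty) (s, p.2)) then Pir ++ [(S1s, p.2)] else Pir) acc := by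
  intro Pi1
  induction Pi1 with
  | nil => intro acc; rfl
  | cons p rest ih =>
    intro acc
    simp only [List.foldl_cons]
    obtain ⟨hflag, hstate⟩ := policyInnerLoop_spec Pi2 p.1 p.2
    rw [ih]
    congr 1
    simp only [alt_cond Pi2 p.1 p.2, ← hflag]
    by_cases hb : (policyInnerLoop Pi2 p.1 p.2).1
    · simp only [hb, if_true, hstate hb]
      rfl
    · simp [hb]

-- ===== VERDICT (by name: the statement is the Claim_ definition above) =====
theorem policySetIntersection_spec : Claim_equal_policySetIntersection := by
  intro Pi1 Pi2 _
  unfold Spec_policySetIntersection policySetIntersection policySetIntersection_alt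
  exact fold_eq Pi2 Pi1 []
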